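-- pv_equiv track=rewrite | github.com/jJup0/LeetCode | Medium/1574. Shortest Subarray to be Removed to Make Array Sorted.py | _find_increasing_length_end
-- ===== SOURCE A (Python) =====
-- def _find_increasing_length_end(arr: list[int]):
--     prev = arr[-1] + 1
--     j = len(arr) - 1
--     for j in range(len(arr) - 1, -1, -1):
--         num = arr[j]
--         if prev < num:
--             j += 1
--             break
--         prev = num
--     return j
-- ===== SOURCE B (Python) =====
-- def _find_increasing_length_end(arr: list[int]):
--     prev = arr[0]
--     start = 0
--     for i in range(1, len(arr)):
--         if arr[i] < prev:
--             start = i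
--         prev = arr[i]
--     return start
-- ===== Notes on version B (the rewrite author's own statement) =====
-- stated objective: alternative
-- what changed: A scans the array backwards with an early break at the first descent seen from the right; B is a single forward pass with no break that records the index of the last strict descent.
import Mathlib
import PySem

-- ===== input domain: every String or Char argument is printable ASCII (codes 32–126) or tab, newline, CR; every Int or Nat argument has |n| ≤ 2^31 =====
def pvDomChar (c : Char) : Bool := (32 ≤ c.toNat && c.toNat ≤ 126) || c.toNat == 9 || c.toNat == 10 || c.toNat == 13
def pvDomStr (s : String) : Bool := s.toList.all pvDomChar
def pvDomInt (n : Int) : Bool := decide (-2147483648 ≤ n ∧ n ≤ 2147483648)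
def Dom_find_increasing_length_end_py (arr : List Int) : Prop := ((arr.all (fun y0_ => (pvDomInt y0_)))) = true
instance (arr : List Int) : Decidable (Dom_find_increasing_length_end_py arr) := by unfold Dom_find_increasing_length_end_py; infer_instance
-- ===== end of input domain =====

-- B replaces A's backward scan with early break by a forward pass recording the last strict descent (objective: alternative decomposition, same cost).

-- ===== PORT A =====
-- the for-loop with break: processes the descending index list; third argument tracks the loop variable j
def pvALoop (arr : List Int) : List Int → Int → Int → Int
  | [], _, j => j
  | idx :: rest, prev, _ =>
    let num := PySem.List.pyGetD arr idx 0
    if prev < num then idx + 1 else pvALoop arr rest num idx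

def find_increasing_length_end_py (arr : List Int) : Int :=
  match PySem.List.pyGet? arr (-1) with
  | none => 0  -- arr[-1] raises IndexError on empty input; excluded by Pre_
  | some last =>
    pvALoop arr (PySem.List.pyRange ((arr.length : Int) - 1) (-1) (-1)) (last + 1) ((arr.length : Int) - 1)

-- ===== PORT B =====
def find_increasing_length_end_py_alt (arr : List Int) : Int :=
  match PySem.List.pyGet? arr 0 with
  | none => 0  -- arr[0] raises IndexError on empty input; excluded by Pre_
  | some first =>
    ((PySem.List.pyRange 1 (arr.length : Int) 1).foldl
      (fun (s : Int × Int) i =>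
        let num := PySem.List.pyGetD arr i 0
        (num, if num < s.1 then i else s.2))
      (first, 0)).2

-- ===== PRECONDITION & SPEC =====
-- Pre_ excludes only the empty list, on which A raises IndexError (arr[-1]).
def Pre_find_increasing_length_end_py (arr : List Int) : Prop := arr ≠ []
instance (arr : List Int) : Decidable (Pre_find_increasing_length_end_py arr) := by unfold Pre_find_increasing_length_end_py; infer_instance
def pvWitness_find_increasing_length_end_py : List Int := [3, 1, 2]
def Spec_find_increasing_length_end_py (arr : List Int) (out : Int) : Prop := out = find_increasing_length_end_py_alt arr
instance (arr : List Int) (out : Int) : Decidable (Spec_find_increasing_length_end_py arr out) := by unfold Spec_find_increasing_length_end_py; infer_instance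

-- ===== CLAIM (what is proved, stated in full; the proofs are below) =====
def Claim_equal_find_increasing_length_end_py : Prop := ∀ (arr : List Int), Dom_find_increasing_length_end_py arr → Pre_find_increasing_length_end_py arr → Spec_find_increasing_length_end_py arr (find_increasing_length_end_py arr)

-- ===== LEMMAS AND PROOFS =====

-- index of the last strict descent within arr[0..k], or 0 if none
def pvDmax (arr : List Int) : Nat → Int
  | 0 => 0
  | k + 1 => if arr.getD (k + 1) 0 < arr.getD k 0 then ((k : Int) + 1) else pvDmax arr k

theorem pvALoop_eq (arr : List Int) (k : Nat) (hk : k < arr.length) :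
    ∀ prev j, pvALoop arr (PySem.List.pyRange (k : Int) (-1) (-1)) prev j
      = if prev < arr.getD k 0 then (k : Int) + 1 else pvDmax arr k := by
  induction k with
  | zero =>
    intro prev j
    rw [PySem.List.pyRange_neg_one_cons (by omega), PySem.List.pyRange_neg_one_eq_nil (by omega)]
    simp only [pvALoop, pvDmax, PySem.List.pyGetD_natCast]
    split_ifs <;> simp
  | succ k ih =>
    intro prev j
    rw [show ((k + 1 : Nat) : Int) = (k : Int) + 1 by push_cast; ring]
    rw [PySem.List.pyRange_neg_one_cons (by omega), show (k : Int) + 1 - 1 = (k : Int) by ring]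
    simp only [pvALoop]
    rw [show ((k : Int) + 1) = ((k + 1 : Nat) : Int) by push_cast; ring,
        PySem.List.pyGetD_natCast arr (k + 1)]
    split_ifs with h
    · rfl
    · rw [ih (by omega) (arr.getD (k + 1) 0) ((k + 1 : Nat) : Int)]
      simp [pvDmax]

theorem pvA_eq_pvDmax (arr : List Int) (h : arr ≠ []) :
    find_increasing_length_end_py arr = pvDmax arr (arr.length - 1) := by
  unfold find_increasing_length_end_py
  rw [PySem.List.pyGet?_neg_one, List.getLast?_eq_some_getLast h]
  have hlen : 0 < arr.length := List.length_pos_iff.mpr h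
  have hcast : (arr.length : Int) - 1 = ((arr.length - 1 : Nat) : Int) := by omega
  rw [hcast]
  show pvALoop arr (PySem.List.pyRange (((arr.length - 1 : Nat) : Int)) (-1) (-1))
        (arr.getLast h + 1) ((arr.length - 1 : Nat) : Int)
      = pvDmax arr (arr.length - 1)
  rw [pvALoop_eq arr (arr.length - 1) (by omega)]
  have hget : arr.getLast h = arr.getD (arr.length - 1) 0 := by
    rw [List.getLast_eq_getElem, List.getD_eq_getElem arr 0 (by omega)]
  rw [hget]
  simp

theorem pvBLoop_eq (arr : List Int) (k : Nat) (hk : k < arr.length) :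
    (PySem.List.pyRange 1 ((k : Int) + 1) 1).foldl
      (fun (s : Int × Int) i =>
        let num := PySem.List.pyGetD arr i 0
        (num, if num < s.1 then i else s.2))
      (arr.getD 0 0, 0)
    = (arr.getD k 0, pvDmax arr k) := by
  induction k with
  | zero => simp [PySem.List.pyRange_one_eq_nil, pvDmax]
  | succ k ih =>
    rw [show ((k + 1 : Nat) : Int) + 1 = ((k : Int) + 1) + 1 by push_cast; ring,
        PySem.List.pyRange_one_succ_right (by omega), List.foldl_append, ih (by omega)]
    simp only [List.foldl_cons, List.foldl_nil]
    rw [show ((k : Int) + 1) = ((k + 1 : Nat) : Int) by push_cast; ring,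
        PySem.List.pyGetD_natCast arr (k + 1)]
    simp [pvDmax]

theorem pvB_eq_pvDmax (arr : List Int) (h : arr ≠ []) :
    find_increasing_length_end_py_alt arr = pvDmax arr (arr.length - 1) := by
  match arr, h with
  | a :: as, _ =>
    unfold find_increasing_length_end_py_alt
    rw [show (0 : Int) = ((0 : Nat) : Int) from rfl, PySem.List.pyGet?_natCast]
    simp only [List.getElem?_cons_zero]
    have hcast : ((a :: as).length : Int) = (((a :: as).length - 1 : Nat) : Int) + 1 := by
      simp
    rw [hcast]
    exact congrArg Prod.snd (pvBLoop_eq (a :: as) ((a :: as).length - 1) (by simp))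

-- ===== VERDICT (by name: the statement is the Claim_ definition above) =====
theorem find_increasing_length_end_py_spec : Claim_equal_find_increasing_length_end_py := by
  intro arr _ hpre
  unfold Spec_find_increasing_length_end_py
  rw [pvA_eq_pvDmax arr hpre, pvB_eq_pvDmax arr hpre]
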